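-- pv_equiv track=rewrite | github.com/teamKandR/narorumo-backup | sleep-furiously/haikubot/syllables.py | closest_vowel_index
-- ===== SOURCE A (Python) =====
-- import string
--
-- def closest_vowel_index(sounds, pos):
--     """Given a list of sounds and an index within that sound (the position of
--     the consonant we're interested in), find out which vowel sound is the
--     closest. In the event of a tie, pick the earlier one."""
--
--     if isvowel(sounds[pos]):
--         return pos
--
--     pairs = [(index, abs(pos - index)) for index in range(len(sounds))
--                                         if isvowel(sounds[index])]
--     thekey = lambda x: x[1]
--     bestpair = min(pairs, key=thekey)
--     return bestpair[0]
--
-- def isvowel(sound):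
--     """Given a string representing a sound, we call it a vowel sound if it ends
--     with a number -- indicating a stress value in the pronouncing dictionary
--     markup."""
--     return sound[-1] in string.digits
-- ===== SOURCE B (Python) =====
-- import string
--
-- def closest_vowel_index(sounds, pos):
--     """Expand outward from pos (left before right at each distance), so the
--     nearest vowel sound is found directly and ties go to the earlier index."""
--     if isvowel(sounds[pos]):
--         return pos
--     n = len(sounds)
--     for d in range(1, n + abs(pos) + 1):
--         left = pos - d
--         if 0 <= left < n and isvowel(sounds[left]):
--             return left
--         right = pos + d
--         if 0 <= right < n and isvowel(sounds[right]):
--             return right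
--     raise ValueError("no vowel sound in sounds")
--
-- def isvowel(sound):
--     """A sound is a vowel sound if it ends with a digit (a stress marker)."""
--     return sound[-1] in string.digits
-- ===== Notes on version B (the rewrite author's own statement) =====
-- stated objective: alternative
-- what changed: Replaces A's build-all-(index,distance)-pairs + min(key=distance) scan with an outward expansion from pos that probes pos-d then pos+d for growing d and returns the first vowel index found (left-first preserves the tie-to-earlier rule).
-- outside the precondition, e.g. on closest_vowel_index(['K', 'T'], 0): A raises ValueError, B raises ValueError; on closest_vowel_index(['AH0', 'T'], 5): A raises IndexError, B raises IndexError; on closest_vowel_index(['T', 'AH0', ''], 0): A raises IndexError, B returns 1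
import Mathlib
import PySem

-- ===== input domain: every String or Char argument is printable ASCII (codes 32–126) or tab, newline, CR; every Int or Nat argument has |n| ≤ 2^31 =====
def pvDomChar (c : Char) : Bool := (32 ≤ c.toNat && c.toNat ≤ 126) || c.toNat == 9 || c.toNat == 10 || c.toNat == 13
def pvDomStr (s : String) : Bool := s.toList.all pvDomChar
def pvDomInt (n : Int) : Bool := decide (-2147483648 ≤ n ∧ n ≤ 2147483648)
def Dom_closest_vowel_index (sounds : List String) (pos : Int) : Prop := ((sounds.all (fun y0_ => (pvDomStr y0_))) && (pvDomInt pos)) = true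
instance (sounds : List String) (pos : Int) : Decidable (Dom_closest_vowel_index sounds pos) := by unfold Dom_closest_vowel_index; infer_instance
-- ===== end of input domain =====

-- B replaces A's full scan + min() with an outward expansion from pos (left probe
-- before right at each distance), so it stops at the first vowel sound found;
-- objective: alternative decomposition (no measured speedup claimed).

-- shared helper: both Pythons define the identical isvowel(sound) = sound[-1] in string.digits
-- ('in' on the 1-char string sound[-1] is char membership of "0123456789"; exact on ASCII)
def isvowelPy (sound : String) : Bool :=
  match PySem.Str.pyGet? sound (-1) with
  | some c => ("0123456789".toList).contains c
  | none => false      -- sound == "": Python raises IndexError; excluded by Pre_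

-- ===== PORT A =====
def closest_vowel_index (sounds : List String) (pos : Int) : Int :=
  match PySem.List.pyGet? sounds pos with
  | none => 0          -- IndexError; excluded by Pre_
  | some s =>
    if isvowelPy s then pos
    else
      let pairs := ((PySem.List.pyRange 0 (sounds.length : Int) 1).filter
          (fun index => isvowelPy (PySem.List.pyGetD sounds index ""))).map
          (fun index => (index, |pos - index|))
      match PySem.List.min? pairs (fun x => x.2) with
      | some bestpair => bestpair.1
      | none => 0      -- min() on empty list: ValueError; excluded by Pre_

-- ===== PORT B =====
-- the for-loop over d = 1 .. n + |pos|, with the trailing 'raise ValueError' as fuel 0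
def expandLoop (sounds : List String) (pos : Int) (n : Int) : Nat → Int → Int
  | 0, _ => 0          -- raise ValueError; excluded by Pre_
  | fuel + 1, d =>
    if 0 ≤ pos - d ∧ pos - d < n ∧ isvowelPy (PySem.List.pyGetD sounds (pos - d) "") then
      pos - d
    else if 0 ≤ pos + d ∧ pos + d < n ∧ isvowelPy (PySem.List.pyGetD sounds (pos + d) "") then
      pos + d
    else
      expandLoop sounds pos n fuel (d + 1)

def closest_vowel_index_alt (sounds : List String) (pos : Int) : Int :=
  match PySem.List.pyGet? sounds pos with
  | none => 0          -- IndexError; excluded by Pre_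
  | some s =>
    if isvowelPy s then pos
    else expandLoop sounds pos (sounds.length : Int) (sounds.length + pos.natAbs) 1

-- ===== PRECONDITION & SPEC =====
-- Pre_ excludes exactly the inputs where the Python A raises: pos out of range
-- (IndexError), sounds[pos] the empty string (IndexError inside isvowel), and —
-- when sounds[pos] is not a vowel sound — any empty string in the list
-- (IndexError in the comprehension) or no vowel sound at all (ValueError in min()).
def Pre_closest_vowel_index (sounds : List String) (pos : Int) : Prop :=
  PySem.Raise.InRange sounds.length pos ∧
  PySem.List.pyGetD sounds pos "" ≠ "" ∧
  (isvowelPy (PySem.List.pyGetD sounds pos "") = false →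
    (∀ t ∈ sounds, t ≠ "") ∧ (∃ t ∈ sounds, isvowelPy t = true))
instance (sounds : List String) (pos : Int) : Decidable (Pre_closest_vowel_index sounds pos) := by
  unfold Pre_closest_vowel_index; infer_instance

def pvWitness_closest_vowel_index : List String × Int := (["K", "AH0", "T"], 2)

def Spec_closest_vowel_index (sounds : List String) (pos : Int) (out : Int) : Prop := out = closest_vowel_index_alt sounds pos
instance (sounds : List String) (pos : Int) (out : Int) : Decidable (Spec_closest_vowel_index sounds pos out) := by unfold Spec_closest_vowel_index; infer_instance

-- ===== CLAIM (what is proved, stated in full; the proofs are below) =====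
def Claim_equal_closest_vowel_index : Prop := ∀ (sounds : List String) (pos : Int), Dom_closest_vowel_index sounds pos → Pre_closest_vowel_index sounds pos → Spec_closest_vowel_index sounds pos (closest_vowel_index sounds pos)

-- ===== LEMMAS AND PROOFS =====

-- "j is a vowel position"
def VowelAt (sounds : List String) (j : Int) : Prop :=
  0 ≤ j ∧ j < (sounds.length : Int) ∧ isvowelPy (PySem.List.pyGetD sounds j "") = true

-- "r is THE answer: a vowel position, and any other vowel position is either
-- strictly farther from pos or no earlier at the same distance"
def Best (sounds : List String) (pos r : Int) : Prop :=
  VowelAt sounds r ∧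
  ∀ j : Int, VowelAt sounds j → |pos - r| < |pos - j| ∨ (|pos - r| = |pos - j| ∧ r ≤ j)

theorem best_unique (sounds : List String) (pos r r' : Int)
    (h : Best sounds pos r) (h' : Best sounds pos r') : r = r' := by
  rcases h with ⟨hv, hmin⟩
  rcases h' with ⟨hv', hmin'⟩
  rcases hmin r' hv' with h1 | ⟨e1, le1⟩ <;> rcases hmin' r hv with h2 | ⟨e2, le2⟩ <;> omega

-- first-minimum characterisation of the foldl inside PySem.List.min?
theorem min_go_first {α : Type} (key : α → Int) (xs : List α) :
    ∀ (acc m : α),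
    xs.foldl (fun a x => match a with
      | none => some x
      | some mm => if key x < key mm then some x else some mm) (some acc) = some m →
    (m = acc ∧ ∀ y ∈ xs, key acc ≤ key y) ∨
    (∃ pre post, xs = pre ++ m :: post ∧ key m < key acc ∧
      (∀ y ∈ pre, key m < key y) ∧ (∀ y ∈ post, key m ≤ key y)) := by
  induction xs with
  | nil => intro acc m h; left; simp only [List.foldl_nil, Option.some.injEq] at h
           exact ⟨h.symm, by simp⟩
  | cons x t ih =>
    intro acc m h
    simp only [List.foldl_cons] at h
    by_cases hx : key x < key acc
    · rw [if_pos hx] at h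
      rcases ih x m h with ⟨rfl, hall⟩ | ⟨pre, post, rfl, hlt, hpre, hpost⟩
      · exact Or.inr ⟨[], t, rfl, hx, by simp, hall⟩
      · refine Or.inr ⟨x :: pre, post, rfl, by omega, ?_, hpost⟩
        intro y hy
        rcases List.mem_cons.mp hy with rfl | hy
        · omega
        · exact hpre y hy
    · rw [if_neg hx] at h
      rcases ih acc m h with ⟨rfl, hall⟩ | ⟨pre, post, rfl, hlt, hpre, hpost⟩
      · refine Or.inl ⟨rfl, ?_⟩
        intro y hy
        rcases List.mem_cons.mp hy with rfl | hy
        · omega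
        · exact hall y hy
      · refine Or.inr ⟨x :: pre, post, rfl, hlt, ?_, hpost⟩
        intro y hy
        rcases List.mem_cons.mp hy with rfl | hy
        · omega
        · exact hpre y hy

theorem min?_first {α : Type} (key : α → Int) (xs : List α) (m : α)
    (h : PySem.List.min? xs key = some m) :
    ∃ pre post, xs = pre ++ m :: post ∧
      (∀ y ∈ pre, key m < key y) ∧ (∀ y ∈ post, key m ≤ key y) := by
  cases xs with
  | nil => simp [PySem.List.min?] at h
  | cons x t =>
    have h' : t.foldl (fun a x => match a with
      | none => some x
      | some mm => if key x < key mm then some x else some mm) (some x) = some m := by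
      simpa [PySem.List.min?] using h
    rcases min_go_first key t x m h' with ⟨rfl, hall⟩ | ⟨pre, post, rfl, _, hpre, hpost⟩
    · exact ⟨[], t, rfl, by simp, hall⟩
    · refine ⟨x :: pre, post, rfl, ?_, hpost⟩
      intro y hy
      rcases List.mem_cons.mp hy with rfl | hy
      · omega
      · exact hpre y hy

-- A's result (non-early branch) is Best
theorem mem_pairs_iff (sounds : List String) (pos : Int) (y : Int × Int) :
    y ∈ ((PySem.List.pyRange 0 (sounds.length : Int) 1).filter
          (fun index => isvowelPy (PySem.List.pyGetD sounds index ""))).map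
          (fun index => (index, |pos - index|)) ↔
    VowelAt sounds y.1 ∧ y.2 = |pos - y.1| := by
  simp only [List.mem_map, List.mem_filter, PySem.List.mem_pyRange_one, VowelAt]
  constructor
  · rintro ⟨i, ⟨⟨h0, h1⟩, hv⟩, rfl⟩
    exact ⟨⟨h0, h1, by simpa using hv⟩, rfl⟩
  · rintro ⟨⟨h0, h1, hv⟩, he⟩
    exact ⟨y.1, ⟨⟨h0, h1⟩, by simpa using hv⟩, by cases y; simp_all⟩

theorem pairs_pairwise (sounds : List String) (pos : Int) :
    (((PySem.List.pyRange 0 (sounds.length : Int) 1).filter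
          (fun index => isvowelPy (PySem.List.pyGetD sounds index ""))).map
          (fun index => (index, |pos - index|))).Pairwise (fun a b => a.1 < b.1) := by
  refine List.Pairwise.map (fun index => (index, |pos - index|)) (fun a b h => h) ?_
  refine List.Pairwise.filter _ ?_
  rw [PySem.List.pyRange_zero_natCast]
  exact List.Pairwise.map _ (fun a b h => by show ((a : Int)) < ((b : Int)); exact_mod_cast h)
    List.pairwise_lt_range

theorem a_best (sounds : List String) (pos : Int) (m : Int × Int)
    (h : PySem.List.min? (((PySem.List.pyRange 0 (sounds.length : Int) 1).filter
          (fun index => isvowelPy (PySem.List.pyGetD sounds index ""))).map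
          (fun index => (index, |pos - index|))) (fun x => x.2) = some m) :
    Best sounds pos m.1 := by
  rcases min?_first _ _ _ h with ⟨pre, post, hsplit, hpre, hpost⟩
  have hmem : m ∈ ((PySem.List.pyRange 0 (sounds.length : Int) 1).filter
          (fun index => isvowelPy (PySem.List.pyGetD sounds index ""))).map
          (fun index => (index, |pos - index|)) := by
    rw [hsplit]; exact List.mem_append_right _ (List.mem_cons_self)
  obtain ⟨hmv, hm2⟩ := (mem_pairs_iff sounds pos m).mp hmem
  refine ⟨hmv, ?_⟩
  intro j hj
  have hjmem : (j, |pos - j|) ∈ ((PySem.List.pyRange 0 (sounds.length : Int) 1).filter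
          (fun index => isvowelPy (PySem.List.pyGetD sounds index ""))).map
          (fun index => (index, |pos - index|)) := by
    rw [mem_pairs_iff]; exact ⟨hj, rfl⟩
  have hpw := pairs_pairwise sounds pos
  rw [hsplit] at hjmem hpw
  have hpost_lt : ∀ y ∈ post, m.1 < y.1 :=
    (List.pairwise_cons.mp ((List.pairwise_append.mp hpw).2.1)).1
  rcases List.mem_append.mp hjmem with hin | hin
  · have hlt : m.2 < |pos - j| := hpre _ hin
    left; omega
  · rcases List.mem_cons.mp hin with he | hin
    · have hj1 : m.1 = j := by rw [← he]
      have hj2 : m.2 = |pos - j| := by rw [← he]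
      right; constructor <;> omega
    · have h1 : m.2 ≤ |pos - j| := hpost _ hin
      have h2 : m.1 < j := hpost_lt _ hin
      rcases lt_or_eq_of_le h1 with hlt | heq
      · left; omega
      · right; constructor <;> omega

-- B's loop invariant
theorem expand_best (sounds : List String) (pos : Int) :
    ∀ (fuel : Nat) (d : Int), 1 ≤ d →
    (∀ j : Int, VowelAt sounds j → d ≤ |pos - j|) →
    (∃ j : Int, VowelAt sounds j ∧ |pos - j| ≤ d - 1 + fuel) →
    Best sounds pos (expandLoop sounds pos (sounds.length : Int) fuel d) := by
  intro fuel
  induction fuel with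
  | zero =>
    intro d _ hfar hreach
    rcases hreach with ⟨j, hj, hle⟩
    have := hfar j hj
    omega
  | succ fuel ih =>
    intro d hd hfar hreach
    simp only [expandLoop]
    split_ifs with h1 h2
    · -- left probe hits: pos - d is Best
      refine ⟨⟨h1.1, h1.2.1, h1.2.2⟩, ?_⟩
      intro j hj
      have hdj := hfar j hj
      have ha : |pos - (pos - d)| = d := by rw [show pos - (pos - d) = d by ring]; exact abs_of_pos (by omega)
      rcases abs_cases (pos - j) with ⟨he, _⟩ | ⟨he, _⟩ <;> omega
    · -- right probe hits (left did not): pos + d is Best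
      refine ⟨⟨h2.1, h2.2.1, h2.2.2⟩, ?_⟩
      intro j hj
      have hdj := hfar j hj
      have ha : |pos - (pos + d)| = d := by rw [show pos - (pos + d) = -d by ring]; rw [abs_neg]; exact abs_of_pos (by omega)
      rcases eq_or_lt_of_le hdj with heq | hlt
      · -- distance exactly d: j must be pos + d (pos - d would have fired the left probe)
        have hj' : j = pos - d ∨ j = pos + d := by
          rcases abs_cases (pos - j) with ⟨he, _⟩ | ⟨he, _⟩ <;> omega
        rcases hj' with rfl | rfl
        · exact absurd ⟨hj.1, hj.2.1, hj.2.2⟩ h1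
        · right; constructor <;> omega
      · left; omega
    · -- no hit at distance d: recurse at d + 1
      apply ih (d + 1) (by omega)
      · intro j hj
        have hdj := hfar j hj
        rcases eq_or_lt_of_le hdj with heq | hlt
        · have hj' : j = pos - d ∨ j = pos + d := by
            rcases abs_cases (pos - j) with ⟨he, _⟩ | ⟨he, _⟩ <;> omega
          rcases hj' with rfl | rfl
          · exact absurd ⟨hj.1, hj.2.1, hj.2.2⟩ h1
          · exact absurd ⟨hj.1, hj.2.1, hj.2.2⟩ h2
        · omega
      · rcases hreach with ⟨j, hj, hle⟩
        exact ⟨j, hj, by omega⟩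

-- pairs is nonempty / a vowel exists, from Pre_
theorem exists_vowelAt (sounds : List String) (hne : ∃ t ∈ sounds, isvowelPy t = true) :
    ∃ j : Int, VowelAt sounds j := by
  rcases hne with ⟨t, ht, hv⟩
  rcases List.mem_iff_getElem.mp ht with ⟨k, hk, rfl⟩
  refine ⟨(k : Int), by positivity, by exact_mod_cast hk, ?_⟩
  rw [PySem.List.pyGetD_eq_getElem sounds _ (by positivity) (by exact_mod_cast hk)]
  simpa using hv

-- ===== VERDICT (by name: the statement is the Claim_ definition above) =====
theorem closest_vowel_index_spec : Claim_equal_closest_vowel_index := by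
  intro sounds pos _ hpre
  rcases hpre with ⟨hin, hne, himp⟩
  unfold Spec_closest_vowel_index
  rcases hin with ⟨hlo, hhi⟩
  cases hg : PySem.List.pyGet? sounds pos with
  | none =>
    exact absurd ((PySem.List.pyGet?_eq_none_iff _ _).mp hg) (by exact fun h => h ⟨hlo, hhi⟩)
  | some s =>
    have hsd : PySem.List.pyGetD sounds pos "" = s := by
      simp [PySem.List.pyGetD, hg]
    simp only [closest_vowel_index, closest_vowel_index_alt, hg]
    by_cases hv : isvowelPy s
    · simp [hv]
    · rw [if_neg hv, if_neg hv]
      rw [hsd] at himp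
      rcases himp (by simpa using hv) with ⟨-, hex⟩
      rcases exists_vowelAt sounds hex with ⟨j0, hj0⟩
      -- B side is Best
      have hB : Best sounds pos (expandLoop sounds pos (sounds.length : Int)
          (sounds.length + pos.natAbs) 1) := by
        apply expand_best sounds pos _ 1 le_rfl
        · intro j hj
          by_contra hc
          have hj_eq : j = pos := by
            rcases abs_cases (pos - j) with ⟨he, _⟩ | ⟨he, _⟩ <;> omega
          subst hj_eq
          rcases hj with ⟨-, -, hjv⟩
          rw [hsd] at hjv
          exact hv hjv
        · refine ⟨j0, hj0, ?_⟩
          have hna : (pos.natAbs : Int) = |pos| := Int.abs_eq_natAbs pos |>.symm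
          rcases hj0 with ⟨h0, h1, -⟩
          rcases abs_cases (pos - j0) with ⟨he, _⟩ | ⟨he, _⟩ <;>
            rcases abs_cases pos with ⟨he2, _⟩ | ⟨he2, _⟩ <;> push_cast <;> omega
      -- A side is Best
      cases hm : PySem.List.min? (((PySem.List.pyRange 0 (sounds.length : Int) 1).filter
          (fun index => isvowelPy (PySem.List.pyGetD sounds index ""))).map
          (fun index => (index, |pos - index|))) (fun x => x.2) with
      | none =>
        have hnil := (PySem.List.min?_eq_none_iff _ _).mp hm
        have : (j0, |pos - j0|) ∈ ((PySem.List.pyRange 0 (sounds.length : Int) 1).filter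
          (fun index => isvowelPy (PySem.List.pyGetD sounds index ""))).map
          (fun index => (index, |pos - index|)) := (mem_pairs_iff sounds pos _).mpr ⟨hj0, rfl⟩
        rw [hnil] at this
        cases this
      | some m =>
        have hA := a_best sounds pos m hm
        exact best_unique sounds pos m.1 _ hA hB
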